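-- pv_equiv track=rewrite | github.com/xydxydxyd1/alias-recommendation | src/alias_generation.py | get_head_freqs
-- ===== SOURCE A (Python) =====
-- def get_head_freqs(history_commands, min_head_len=4):
--     """Get a map of all heads and their frequencies, ignoring heads shorter than
--     min_head_len
--
--     Heads are the first n words of a command, where n is any real number.
--     """
--     head_map = {}
--
--     for command in history_commands:
--         words = command.split()
--         for i in range(1, len(words) + 1):
--             head = " ".join(words[:i])
--             if len(head) < min_head_len:
--                 continue
--             if head not in head_map:
--                 head_map[head] = 1
--             else:
--                 head_map[head] += 1
--     return head_map
-- ===== SOURCE B (Python) =====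
-- def get_head_freqs(history_commands, min_head_len=4):
--     """Get a map of all heads and their frequencies, ignoring heads shorter than
--     min_head_len
--
--     Heads are the first n words of a command, where n is any real number.
--     """
--     head_map = {}
--     for command in history_commands:
--         head = None
--         for word in command.split():
--             head = word if head is None else head + " " + word
--             if len(head) >= min_head_len:
--                 head_map[head] = head_map.get(head, 0) + 1
--     return head_map
-- ===== Notes on version B (the rewrite author's own statement) =====
-- stated objective: faster
-- what changed: A's nested index loop that re-joins words[:i] (a fresh slice and join) for every prefix length i is replaced by a single pass per command that extends one running head string word by word and counts with dict.get, so the inner slice-and-join rescans disappear.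
import Mathlib
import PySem

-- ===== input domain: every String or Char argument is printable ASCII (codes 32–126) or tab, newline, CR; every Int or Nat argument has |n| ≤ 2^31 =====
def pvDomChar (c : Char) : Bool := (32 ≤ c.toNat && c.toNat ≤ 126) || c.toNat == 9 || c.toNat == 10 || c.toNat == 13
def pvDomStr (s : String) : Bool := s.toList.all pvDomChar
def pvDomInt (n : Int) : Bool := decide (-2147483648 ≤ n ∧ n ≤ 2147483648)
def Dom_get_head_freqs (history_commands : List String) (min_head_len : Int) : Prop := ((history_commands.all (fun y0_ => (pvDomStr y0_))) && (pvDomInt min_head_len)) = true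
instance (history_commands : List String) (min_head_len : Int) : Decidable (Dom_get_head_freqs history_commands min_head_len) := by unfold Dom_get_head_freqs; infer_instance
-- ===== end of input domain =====

-- B replaces A's nested index loop (re-joining words[:i] for every i) by a single pass per
-- command that extends a running head string word by word; same return value, fewer rescans.

-- ===== PORT A =====
-- literal port of A: for each command, for i in range(1, len(words)+1), head = " ".join(words[:i])
def get_head_freqs (history_commands : List String) (min_head_len : Int) : List (String × Int) :=
  (history_commands.foldl (fun head_map command =>
      let words := PySem.Str.split₀ command
      (PySem.List.pyRange 1 ((words.length : Int) + 1) 1).foldl (fun head_map i =>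
          let head := PySem.Str.join " " (PySem.List.slice words none (some i))
          if PySem.Str.len head < min_head_len then head_map
          else if head_map.contains head = false then head_map.insert head 1
          else head_map.insert head (head_map.getD head 0 + 1))
        head_map)
    PySem.Dict.empty).items

-- ===== PORT B =====
-- literal port of Source B: running accumulator `head : Option String` (None before the first word)
def get_head_freqs_alt (history_commands : List String) (min_head_len : Int) : List (String × Int) :=
  (history_commands.foldl (fun head_map command =>
      ((PySem.Str.split₀ command).foldl
          (fun (st : Option String × PySem.Dict String Int) word =>
            let head := match st.1 with
              | none => word
              | some h => String.ofList (h.toList ++ ' ' :: word.toList)  -- head + " " + word, exact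
            (some head,
              if min_head_len ≤ PySem.Str.len head then
                st.2.insert head (st.2.getD head 0 + 1)
              else st.2))
          (none, head_map)).2)
    PySem.Dict.empty).items

-- ===== PRECONDITION & SPEC =====
def Spec_get_head_freqs (history_commands : List String) (min_head_len : Int) (out : List (String × Int)) : Prop := out = get_head_freqs_alt history_commands min_head_len
instance (history_commands : List String) (min_head_len : Int) (out : List (String × Int)) : Decidable (Spec_get_head_freqs history_commands min_head_len out) := by unfold Spec_get_head_freqs; infer_instance

-- ===== CLAIM (what is proved, stated in full; the proofs are below) =====
def Claim_equal_get_head_freqs : Prop := ∀ (history_commands : List String) (min_head_len : Int), Dom_get_head_freqs history_commands min_head_len → Spec_get_head_freqs history_commands min_head_len (get_head_freqs history_commands min_head_len)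

-- ===== LEMMAS AND PROOFS =====

-- "head + \" \" + word" as B computes it
def pvCat (h w : String) : String := String.ofList (h.toList ++ ' ' :: w.toList)

-- the sequence of head strings B produces for one command, given the running accumulator
def pvHeads : Option String → List String → List String
  | _, [] => []
  | acc, w :: ws =>
      let h := match acc with | none => w | some h => pvCat h w
      h :: pvHeads (some h) ws

-- the common per-head dictionary update
def pvStep (m : Int) (d : PySem.Dict String Int) (h : String) : PySem.Dict String Int :=
  if m ≤ PySem.Str.len h then d.insert h (d.getD h 0 + 1) else d

-- strings are equal when their character lists are
theorem pvStrExt {s t : String} (h : s.toList = t.toList) : s = t := by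
  have := congrArg String.ofList h
  simpa using this

theorem pvCat_eq_join (h w : String) : pvCat h w = PySem.Str.join " " [h, w] := by
  apply pvStrExt
  simp [PySem.Str.toList_join, PySem.Chars.join_cons_cons, PySem.Chars.join_singleton, pvCat]

theorem pvJoin_single (w : String) : PySem.Str.join " " [w] = w := by
  apply pvStrExt
  simp [PySem.Str.toList_join, PySem.Chars.join_singleton]

theorem pvJoin_cons (h w : String) (l : List String) :
    PySem.Str.join " " (h :: w :: l) = PySem.Str.join " " (pvCat h w :: l) := by
  apply pvStrExt
  cases l with
  | nil => simp [PySem.Str.toList_join, PySem.Chars.join_cons_cons,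
      PySem.Chars.join_singleton, pvCat]
  | cons x xs => simp [PySem.Str.toList_join, PySem.Chars.join_cons_cons, pvCat]

theorem pvHeads_some (ws : List String) : ∀ h : String,
    pvHeads (some h) ws
      = (List.range ws.length).map (fun k => PySem.Str.join " " (h :: ws.take (k + 1))) := by
  induction ws with
  | nil => intro h; rfl
  | cons w ws ih =>
      intro h
      simp only [pvHeads, List.length_cons, List.range_succ_eq_map, List.map_cons,
        List.map_map, List.take_succ_cons, ih (pvCat h w)]
      rw [List.cons.injEq]
      constructor
      · rw [List.take_zero, pvCat_eq_join]
      · apply List.map_congr_left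
        intro k _
        simp only [Function.comp]
        exact (pvJoin_cons h w _).symm

theorem pvHeads_none (ws : List String) :
    pvHeads none ws
      = (List.range ws.length).map (fun k => PySem.Str.join " " (ws.take (k + 1))) := by
  cases ws with
  | nil => rfl
  | cons w ws =>
      simp only [pvHeads, List.length_cons, List.range_succ_eq_map, List.map_cons,
        List.map_map, List.take_succ_cons, pvHeads_some ws w]
      rw [List.cons.injEq]
      constructor
      · rw [List.take_zero, pvJoin_single]
      · apply List.map_congr_left
        intro k _
        simp [Function.comp]

-- B's inner fold is the fold of pvStep over pvHeads
theorem pvB_inner (m : Int) (ws : List String) :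
    ∀ (acc : Option String) (d : PySem.Dict String Int),
    ((ws.foldl (fun (st : Option String × PySem.Dict String Int) word =>
        let head := match st.1 with
          | none => word
          | some h => String.ofList (h.toList ++ ' ' :: word.toList)
        (some head,
          if m ≤ PySem.Str.len head then st.2.insert head (st.2.getD head 0 + 1) else st.2))
      (acc, d)).2)
      = (pvHeads acc ws).foldl (pvStep m) d := by
  induction ws with
  | nil => intro acc d; rfl
  | cons w ws ih =>
      intro acc d
      cases acc with
      | none => simp only [List.foldl_cons, pvHeads, pvStep, ih]
      | some h => simp only [List.foldl_cons, pvHeads, pvStep, pvCat, ih]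

-- A's branchy update equals pvStep
theorem pvA_step (m : Int) (d : PySem.Dict String Int) (h : String) :
    (if PySem.Str.len h < m then d
     else if d.contains h = false then d.insert h 1
     else d.insert h (d.getD h 0 + 1)) = pvStep m d h := by
  unfold pvStep
  by_cases hlt : PySem.Str.len h < m
  · rw [if_pos hlt, if_neg (show ¬ m ≤ PySem.Str.len h by omega)]
  · rw [if_neg hlt, if_pos (show m ≤ PySem.Str.len h by omega)]
    by_cases hc : d.contains h = false
    · rw [if_pos hc]
      congr 1
      rw [PySem.Dict.getD_of_not_contains _ _ hc]
      omega
    · rw [if_neg hc]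

-- A's inner fold is the same fold of pvStep over pvHeads
theorem pvA_inner (m : Int) (ws : List String) (d : PySem.Dict String Int) :
    (PySem.List.pyRange 1 ((ws.length : Int) + 1) 1).foldl (fun d i =>
        let head := PySem.Str.join " " (PySem.List.slice ws none (some i))
        if PySem.Str.len head < m then d
        else if d.contains head = false then d.insert head 1
        else d.insert head (d.getD head 0 + 1)) d
      = (pvHeads none ws).foldl (pvStep m) d := by
  have hn : (((ws.length : Int) + 1) - 1).toNat = ws.length := by omega
  rw [PySem.List.pyRange_one, hn, List.foldl_map, pvHeads_none, List.foldl_map]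
  apply PySem.List.foldl_congr_mem
  intro acc k _
  have h1 : (1 + (k : Int)) = ((k + 1 : Nat) : Int) := by push_cast; ring
  simp only [h1, PySem.List.slice_to_natCast]
  exact pvA_step m acc _

theorem pvMain (hc : List String) (m : Int) :
    get_head_freqs hc m = get_head_freqs_alt hc m := by
  unfold get_head_freqs get_head_freqs_alt
  congr 1
  induction hc using List.reverseRecOn with
  | nil => rfl
  | append_singleton hs c ih =>
      simp only [List.foldl_append, List.foldl_cons, List.foldl_nil, ih]
      rw [pvA_inner, pvB_inner]

-- ===== VERDICT (by name: the statement is the Claim_ definition above) =====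
theorem get_head_freqs_spec : Claim_equal_get_head_freqs := by
  intro hc m _
  exact pvMain hc m
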